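-- pv_equiv track=rewrite | github.com/Vignesh010101/Leetcode-Solutions-With-Python-Part-2 | 1113-moving-stones-until-consecutive-ii/moving-stones-until-consecutive-ii.py | numMovesStonesII
-- ===== SOURCE A (Python) =====
-- def numMovesStonesII(stones: list[int]) -> list[int]:
--     A, N = sorted(stones), len(stones)
--     maxMoves = max(A[N - 1] - A[1] - N + 2, A[N - 2] - A[0] - N + 2)
--     minMoves = N
--
--     # Calculate minimum moves through sliding window.
--     start = 0
--     for end in range(N):
--         while A[end] - A[start] + 1 > N:
--             start += 1
--
--         if end - start + 1 == N - 1 and A[end] - A[start] + 1 == N - 1: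
--             # Case: N - 1 stones with N - 1 positions.
--             minMoves = min(minMoves, 2)
--         else:
--             minMoves = min(minMoves, N - (end - start + 1))
--
--     return [minMoves, maxMoves]
-- ===== SOURCE B (Python) =====
-- import bisect
--
-- def numMovesStonesII(stones: list[int]) -> list[int]:
--     A, N = sorted(stones), len(stones)
--     maxMoves = max(A[N - 1] - A[1], A[N - 2] - A[0]) - N + 2
--     minMoves = N
--     # For each i as the LEFT end of a window of span N, binary-search the
--     # rightmost stone that still fits in [A[i], A[i] + N - 1].
--     for i in range(N):
--         j = bisect.bisect_right(A, A[i] + N - 1) - 1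
--         size = j - i + 1
--         if size == N - 1 and A[j] - A[i] + 1 == N - 1:
--             minMoves = min(minMoves, 2)
--         else:
--             minMoves = min(minMoves, N - size)
--     return [minMoves, maxMoves]
-- ===== Notes on version B (the rewrite author's own statement) =====
-- stated objective: alternative
-- what changed: A's amortized two-pointer sliding window (right-anchored, threading a mutable start through an inner while) is replaced by an independent per-left-anchor binary search: for each i, bisect_right finds the rightmost stone fitting in [A[i], A[i]+N-1]; the same closed-form max is kept.
import Mathlib
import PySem

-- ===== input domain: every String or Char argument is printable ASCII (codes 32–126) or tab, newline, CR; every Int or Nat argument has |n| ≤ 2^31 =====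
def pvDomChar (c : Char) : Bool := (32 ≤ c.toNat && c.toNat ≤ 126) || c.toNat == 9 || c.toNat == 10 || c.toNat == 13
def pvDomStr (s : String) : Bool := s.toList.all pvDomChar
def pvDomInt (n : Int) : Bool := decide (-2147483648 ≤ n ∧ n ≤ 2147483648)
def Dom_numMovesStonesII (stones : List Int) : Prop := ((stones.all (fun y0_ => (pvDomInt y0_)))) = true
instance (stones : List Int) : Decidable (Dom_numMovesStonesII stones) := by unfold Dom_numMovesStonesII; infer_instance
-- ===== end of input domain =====

-- B replaces A's sliding-window minimum (threaded `start`, inner while) by an independent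
-- binary search (bisect_right) per left anchor; same return value on every input A accepts.

-- ===== PORT A =====
-- the inner `while A[end] - A[start] + 1 > N: start += 1`; the fuel argument only makes the
-- recursion total — `e + 1 - start` steps always suffice for the call sites under Pre_.
def pvAdvance (A : List Int) (Nv : Int) (e : Nat) : Nat → Nat → Nat
  | 0, start => start
  | fuel + 1, start =>
      if Nv < A.getD e 0 - A.getD start 0 + 1 then pvAdvance A Nv e fuel (start + 1) else start

def numMovesStonesII (stones : List Int) : List Int :=
  let A := PySem.List.sorted stones (fun x => x)
  let N := stones.length
  let Nv : Int := (N : Int)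
  -- A[N-1], A[N-2], A[1], A[0]: in range for N ≥ 2 (Pre_); Python raises IndexError for N < 2
  let maxMoves := max (A.getD (N - 1) 0 - A.getD 1 0 - Nv + 2) (A.getD (N - 2) 0 - A.getD 0 0 - Nv + 2)
  -- for end in range(N), threading (start, minMoves)
  let r := (List.range N).foldl (fun (p : Nat × Int) e =>
      let start := pvAdvance A Nv e (e + 1 - p.1) p.1
      if (e : Int) - (start : Int) + 1 = Nv - 1 ∧ A.getD e 0 - A.getD start 0 + 1 = Nv - 1 then
        (start, min p.2 2)
      else
        (start, min p.2 (Nv - ((e : Int) - (start : Int) + 1)))) (0, Nv)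
  [r.2, maxMoves]

-- ===== PORT B =====
def numMovesStonesII_alt (stones : List Int) : List Int :=
  let A := PySem.List.sorted stones (fun x => x)
  let N := stones.length
  let Nv : Int := (N : Int)
  let maxMoves := max (A.getD (N - 1) 0 - A.getD 1 0) (A.getD (N - 2) 0 - A.getD 0 0) - Nv + 2
  let minMoves := (List.range N).foldl (fun m i =>
      let j := PySem.List.bisectRight A (A.getD i 0 + Nv - 1) - 1
      let size : Int := (j : Int) - (i : Int) + 1
      if size = Nv - 1 ∧ A.getD j 0 - A.getD i 0 + 1 = Nv - 1 then min m 2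
      else min m (Nv - size)) Nv
  [minMoves, maxMoves]

-- ===== PRECONDITION & SPEC =====
-- Python A raises IndexError (A[1], or A[-1] of []) exactly when len(stones) < 2.
def Pre_numMovesStonesII (stones : List Int) : Prop := 2 ≤ stones.length
instance (stones : List Int) : Decidable (Pre_numMovesStonesII stones) := by
  unfold Pre_numMovesStonesII; infer_instance
def pvWitness_numMovesStonesII : List Int := [7, 4, 9]

def Spec_numMovesStonesII (stones : List Int) (out : List Int) : Prop := out = numMovesStonesII_alt stones
instance (stones : List Int) (out : List Int) : Decidable (Spec_numMovesStonesII stones out) := by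
  unfold Spec_numMovesStonesII; infer_instance

-- ===== CLAIM (what is proved, stated in full; the proofs are below) =====
def Claim_equal_numMovesStonesII : Prop := ∀ (stones : List Int), Dom_numMovesStonesII stones → Pre_numMovesStonesII stones → Spec_numMovesStonesII stones (numMovesStonesII stones)

-- ===== LEMMAS AND PROOFS =====

-- leftmost window start A's while-loop reaches for right end e (computed with ample fuel)
def pvSMin (L : List Int) (Nv : Int) (e : Nat) : Nat := pvAdvance L Nv e (e + 1) 0

-- rightmost index whose value fits in [L[i], L[i] + Nv - 1] (B's bisect result)
def pvJ (L : List Int) (Nv : Int) (i : Nat) : Nat :=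
  PySem.List.bisectRight L (L.getD i 0 + Nv - 1) - 1

-- cost contributed by the window [s, e]
def pvCost (L : List Int) (Nv : Int) (s e : Nat) : Int :=
  if (e : Int) - (s : Int) + 1 = Nv - 1 ∧ L.getD e 0 - L.getD s 0 + 1 = Nv - 1 then 2
  else Nv - ((e : Int) - (s : Int) + 1)

lemma pvGetD_mono (L : List Int) (hs : List.Pairwise (· ≤ ·) L) {a b : Nat}
    (hab : a ≤ b) (hb : b < L.length) : L.getD a 0 ≤ L.getD b 0 := by
  rcases eq_or_lt_of_le hab with rfl | h
  · exact le_refl _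
  · rw [List.getD_eq_getElem _ _ (by omega), List.getD_eq_getElem _ _ hb]
    exact List.pairwise_iff_getElem.mp hs a b (by omega) hb h

lemma pvAdvance_spec (L : List Int) (Nv : Int) (e : Nat) :
    ∀ fuel start s', start ≤ s' →
      (∀ s, start ≤ s → s < s' → ¬ (L.getD e 0 - L.getD s 0 + 1 ≤ Nv)) →
      (L.getD e 0 - L.getD s' 0 + 1 ≤ Nv) → s' - start < fuel →
      pvAdvance L Nv e fuel start = s' := by
  intro fuel
  induction fuel with
  | zero => intro start s' _ _ _ h; omega
  | succ f ih =>
    intro start s' hle hmin hok hfuel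
    unfold pvAdvance
    split_ifs with hc
    · have hne : start ≠ s' := by
        intro h; subst h; omega
      exact ih (start + 1) s' (by omega) (fun s hs hs' => hmin s (by omega) hs') hok (by omega)
    · rcases eq_or_lt_of_le hle with rfl | h
      · rfl
      · exact absurd (by omega) (hmin start (le_refl _) h)

lemma pvAdvance_props (L : List Int) (Nv : Int) (e : Nat) (hNv : 1 ≤ Nv) :
    ∀ fuel start, start ≤ e → e - start < fuel →
      pvAdvance L Nv e fuel start ≤ e ∧
      (L.getD e 0 - L.getD (pvAdvance L Nv e fuel start) 0 + 1 ≤ Nv) ∧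
      (∀ s, start ≤ s → s < pvAdvance L Nv e fuel start →
        ¬ (L.getD e 0 - L.getD s 0 + 1 ≤ Nv)) := by
  intro fuel
  induction fuel with
  | zero => intro start _ h; omega
  | succ f ih =>
    intro start hse hfuel
    unfold pvAdvance
    split_ifs with hc
    · have hne : start ≠ e := by
        intro h; subst h; omega
      obtain ⟨h1, h2, h3⟩ := ih (start + 1) (by omega) (by omega)
      refine ⟨h1, h2, fun s hs hs' => ?_⟩
      rcases Nat.eq_or_lt_of_le hs with rfl | hlt
      · omega
      · exact h3 s (by omega) hs'
    · exact ⟨hse, by omega, fun s hs hs' => by omega⟩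

lemma pvSMin_le (L : List Int) (Nv : Int) (e : Nat) (hNv : 1 ≤ Nv) :
    pvSMin L Nv e ≤ e :=
  (pvAdvance_props L Nv e hNv (e + 1) 0 (by omega) (by omega)).1

lemma pvSMin_ok (L : List Int) (Nv : Int) (e : Nat) (hNv : 1 ≤ Nv) :
    L.getD e 0 - L.getD (pvSMin L Nv e) 0 + 1 ≤ Nv :=
  (pvAdvance_props L Nv e hNv (e + 1) 0 (by omega) (by omega)).2.1

lemma pvSMin_min (L : List Int) (Nv : Int) (e : Nat) (hNv : 1 ≤ Nv) :
    ∀ s, s < pvSMin L Nv e → ¬ (L.getD e 0 - L.getD s 0 + 1 ≤ Nv) := by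
  intro s hs
  exact (pvAdvance_props L Nv e hNv (e + 1) 0 (by omega) (by omega)).2.2 s (by omega) hs

lemma pvSMin_mono (L : List Int) (Nv : Int) (hs : List.Pairwise (· ≤ ·) L) (hNv : 1 ≤ Nv)
    {e' e : Nat} (hee : e' ≤ e) (he : e < L.length) : pvSMin L Nv e' ≤ pvSMin L Nv e := by
  by_contra h
  push Not at h
  have hok : L.getD e 0 - L.getD (pvSMin L Nv e) 0 + 1 ≤ Nv := pvSMin_ok L Nv e hNv
  have hmono : L.getD e' 0 ≤ L.getD e 0 := pvGetD_mono L hs hee he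
  exact pvSMin_min L Nv e' hNv (pvSMin L Nv e) h (by omega)

-- A's threaded fold computes, at each end e, the window [pvSMin e, e]
lemma pvFoldA (L : List Int) (Nv : Int) (hs : List.Pairwise (· ≤ ·) L) (hNv : 1 ≤ Nv) :
    ∀ k, k ≤ L.length →
      (List.range k).foldl (fun (p : Nat × Int) e =>
        let start := pvAdvance L Nv e (e + 1 - p.1) p.1
        if (e : Int) - (start : Int) + 1 = Nv - 1 ∧ L.getD e 0 - L.getD start 0 + 1 = Nv - 1 then
          (start, min p.2 2)
        else
          (start, min p.2 (Nv - ((e : Int) - (start : Int) + 1)))) (0, Nv) =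
      ((if k = 0 then 0 else pvSMin L Nv (k - 1)),
       (List.range k).foldl (fun m e => min m (pvCost L Nv (pvSMin L Nv e) e)) Nv) := by
  intro k
  induction k with
  | zero => intro _; rfl
  | succ k ih =>
    intro hk
    rw [List.range_succ, List.foldl_append, List.foldl_append, ih (by omega)]
    simp only [List.foldl_cons, List.foldl_nil]
    have hkle : pvSMin L Nv k ≤ k := pvSMin_le L Nv k hNv
    have hprev : (if k = 0 then 0 else pvSMin L Nv (k - 1)) ≤ pvSMin L Nv k := by
      split_ifs with h0
      · omega
      · exact pvSMin_mono L Nv hs hNv (by omega) (by omega)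
    have hadv : pvAdvance L Nv k (k + 1 - (if k = 0 then 0 else pvSMin L Nv (k - 1)))
        (if k = 0 then 0 else pvSMin L Nv (k - 1)) = pvSMin L Nv k := by
      apply pvAdvance_spec L Nv k _ _ _ hprev
        (fun s _ hs' => pvSMin_min L Nv k hNv s hs')
        (pvSMin_ok L Nv k hNv)
      have hple : (if k = 0 then 0 else pvSMin L Nv (k - 1)) ≤ k := by omega
      omega
    simp only [hadv, pvCost, Nat.succ_ne_zero, if_false, Nat.add_sub_cancel]
    split_ifs with hC <;> rfl

-- B's bisect endpoint: i ≤ pvJ i < length, the window is valid, and pvJ i is maximal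
lemma pvJ_props (L : List Int) (Nv : Int) (hs : List.Pairwise (· ≤ ·) L) (hNv : 1 ≤ Nv)
    {i : Nat} (hi : i < L.length) :
    i ≤ pvJ L Nv i ∧ pvJ L Nv i < L.length ∧
      (L.getD (pvJ L Nv i) 0 - L.getD i 0 + 1 ≤ Nv) ∧
      (∀ k, k < L.length → pvJ L Nv i < k → ¬ (L.getD k 0 - L.getD i 0 + 1 ≤ Nv)) := by
  obtain ⟨hc_le, hlt, hge⟩ := PySem.List.bisectRight_spec L (L.getD i 0 + Nv - 1) hs
  set x := L.getD i 0 + Nv - 1 with hx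
  set c := PySem.List.bisectRight L x with hc
  have hgi : L.getD i 0 = L[i] := List.getD_eq_getElem L 0 hi
  have hic : i < c := by
    by_contra h
    push Not at h
    have := hge i hi h
    omega
  have hj : pvJ L Nv i = c - 1 := rfl
  refine ⟨by omega, by omega, ?_, ?_⟩
  · have hjlt : c - 1 < L.length := by omega
    have := hlt (c - 1) hjlt (by omega)
    rw [hj, List.getD_eq_getElem L 0 hjlt, hgi]
    omega
  · intro k hk hkj
    rw [hj] at hkj
    have := hge k hk (by omega)
    rw [List.getD_eq_getElem L 0 hk, hgi]
    omega

-- cost is antitone under enlarging the window (indices only; equal sizes force equal windows)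
lemma pvCost_mono (L : List Int) (Nv : Int) {s' e' s e : Nat}
    (hsz : (e : Int) - (s : Int) ≤ (e' : Int) - (s' : Int))
    (heq : (e : Int) - (s : Int) = (e' : Int) - (s' : Int) → e' = e ∧ s' = s) :
    pvCost L Nv s' e' ≤ pvCost L Nv s e := by
  unfold pvCost
  split_ifs with h1 h2 h2
  · exact le_refl _
  · -- big window 2-case, small not
    by_cases hq : (e : Int) - (s : Int) = (e' : Int) - (s' : Int)
    · obtain ⟨he, hs0⟩ := heq hq
      subst he; subst hs0
      exact absurd h1 h2
    · omega
  · -- small window 2-case, big not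
    omega
  · omega

-- min-fold domination: every f-candidate is dominated by some g-candidate
lemma pvMinfold_le (n : Nat) (f g : Nat → Int) (a : Int)
    (h : ∀ e, e < n → ∃ i, i < n ∧ g i ≤ f e) :
    (List.range n).foldl (fun m i => min m (g i)) a ≤
      (List.range n).foldl (fun m e => min m (f e)) a := by
  have hg : (List.range n).foldl (fun m i => min m (g i)) a = ((List.range n).map g).foldl min a := by
    rw [List.foldl_map]
  have hf : (List.range n).foldl (fun m e => min m (f e)) a = ((List.range n).map f).foldl min a := by
    rw [List.foldl_map]
  rw [hg, hf]
  rcases PySem.List.foldl_min_mem ((List.range n).map f) a with hmem | hmem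
  · rw [hmem]
    exact (PySem.List.foldl_min_le ((List.range n).map g) a).1
  · rw [List.mem_map] at hmem
    obtain ⟨e, he, hfe⟩ := hmem
    rw [List.mem_range] at he
    obtain ⟨i, hin, hgi⟩ := h e he
    calc ((List.range n).map g).foldl min a ≤ g i :=
          (PySem.List.foldl_min_le ((List.range n).map g) a).2 (g i)
            (List.mem_map.mpr ⟨i, List.mem_range.mpr hin, rfl⟩)
      _ ≤ f e := hgi
      _ = _ := hfe

-- the two minimum folds agree
lemma pvMin_eq (L : List Int) (Nv : Int) (hs : List.Pairwise (· ≤ ·) L) (hNv : 1 ≤ Nv) :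
    (List.range L.length).foldl (fun m e => min m (pvCost L Nv (pvSMin L Nv e) e)) Nv =
      (List.range L.length).foldl (fun m i => min m (pvCost L Nv i (pvJ L Nv i))) Nv := by
  apply le_antisymm
  · -- A-fold ≤ B-fold: window [i, pvJ i] is dominated by A's window ending at pvJ i
    apply pvMinfold_le
    intro i hi
    obtain ⟨hij, hjlt, hok, _⟩ := pvJ_props L Nv hs hNv hi
    refine ⟨pvJ L Nv i, hjlt, ?_⟩
    have hsle : pvSMin L Nv (pvJ L Nv i) ≤ i := by
      by_contra h
      push Not at h
      exact pvSMin_min L Nv (pvJ L Nv i) hNv i h hok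
    exact pvCost_mono L Nv (by omega) (by omega)
  · -- B-fold ≤ A-fold: window [pvSMin e, e] is dominated by B's window starting at pvSMin e
    apply pvMinfold_le
    intro e he
    set s := pvSMin L Nv e with hsdef
    have hsle : s ≤ e := pvSMin_le L Nv e hNv
    have hok : L.getD e 0 - L.getD s 0 + 1 ≤ Nv := pvSMin_ok L Nv e hNv
    obtain ⟨hsj, hjlt, _, hmax⟩ := pvJ_props L Nv hs hNv (show s < L.length by omega)
    refine ⟨s, by omega, ?_⟩
    have hej : e ≤ pvJ L Nv s := by
      by_contra h
      push Not at h
      exact hmax e he h hok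
    exact pvCost_mono L Nv (by omega) (by omega)

-- ===== VERDICT (by name: the statement is the Claim_ definition above) =====
theorem numMovesStonesII_spec : Claim_equal_numMovesStonesII := by
  intro stones _ hpre
  unfold Pre_numMovesStonesII at hpre
  unfold Spec_numMovesStonesII numMovesStonesII numMovesStonesII_alt
  dsimp only
  set L := PySem.List.sorted stones (fun x => x) with hL
  have hlen : L.length = stones.length := PySem.List.length_sorted stones (fun x => x) false
  have hs : List.Pairwise (· ≤ ·) L := PySem.List.sorted_pairwise stones (fun x => x)
  set N := stones.length with hN
  set Nv : Int := (N : Int) with hNv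
  have h1 : 1 ≤ Nv := by omega
  have hA := pvFoldA L Nv hs h1 N (by omega)
  dsimp only at hA
  congr 1
  · -- minimum components agree
    rw [hA]
    have hM := pvMin_eq L Nv hs h1
    rw [hlen] at hM
    dsimp only
    rw [hM]
    apply PySem.List.foldl_congr_mem'
    intro i _ m
    simp only [pvCost, pvJ]
    split_ifs <;> rfl
  · -- maximum components agree
    congr 1
    omega
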